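-- pv_equiv track=rewrite | github.com/nastia-vorobiova/KPI | OP_2/lab 1/Python/edittext.py | linewithoutcommas
-- ===== SOURCE A (Python) =====
-- def linewithoutcommas(lines):
--     commas = 0
--     for i in range(len(lines)):
--         editedline = ""
--         k = 1
--         while k < len(lines[i]):
--             if lines[i][k] == ',' and lines[i][k] == lines[i][k-1]:
--                 lines[i] = lines[i][:k] + lines[i][k+1:]
--                 k -= 1
--                 commas += 1
--             k += 1
--     return lines, commas
-- ===== SOURCE B (Python) =====
-- def linewithoutcommas(lines):
--     commas = 0
--     for i, line in enumerate(lines):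
--         new = "".join(c for j, c in enumerate(line)
--                       if not (c == ',' and j + 1 < len(line) and line[j + 1] == ','))
--         commas += line.count(',') - new.count(',')
--         lines[i] = new
--     return lines, commas
-- ===== Notes on version B (the rewrite author's own statement) =====
-- stated objective: simpler
-- what changed: Replaces A's index-based while loop that repeatedly deletes characters by string slicing (rebuilding the line on every removal) with a single per-line filtering pass that drops each comma followed by a comma, counting removals as count-before minus count-after of ','.
import Mathlib
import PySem

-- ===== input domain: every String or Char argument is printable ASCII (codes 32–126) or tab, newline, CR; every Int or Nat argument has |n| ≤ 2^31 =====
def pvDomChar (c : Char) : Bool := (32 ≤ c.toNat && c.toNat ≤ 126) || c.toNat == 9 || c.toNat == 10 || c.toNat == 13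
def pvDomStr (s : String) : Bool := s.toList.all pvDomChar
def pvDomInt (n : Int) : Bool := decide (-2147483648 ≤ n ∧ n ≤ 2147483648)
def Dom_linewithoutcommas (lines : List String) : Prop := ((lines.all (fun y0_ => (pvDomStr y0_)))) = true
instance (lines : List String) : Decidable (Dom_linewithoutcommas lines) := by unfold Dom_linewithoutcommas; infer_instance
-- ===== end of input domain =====

-- B replaces A's index-scan with in-place slice deletions by a single per-line pass dropping each
-- comma that is followed by a comma, counting removals as count-before minus count-after (objective:
-- simpler). Both Pythons mutate `lines` in place identically; the equivalence is about the return value.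

-- ===== PORT A =====
-- while k < len(lines[i]): if lines[i][k] == ',' and lines[i][k] == lines[i][k-1]:
--   lines[i] = lines[i][:k] + lines[i][k+1:]; k -= 1; commas += 1; k += 1 (net: k unchanged on deletion)
def aLoop (s : List Char) (k : Nat) (commas : Int) : List Char × Int :=
  if _h : k < s.length then
    if s[k]! = ',' ∧ s[k]! = s[k-1]! then
      aLoop (s.take k ++ s.drop (k+1)) k (commas + 1)
    else
      aLoop s (k+1) commas
  else (s, commas)
termination_by s.length - k
decreasing_by
  · simp [List.length_take, List.length_drop]; omega
  · omega

def linewithoutcommas (lines : List String) : List String × Int :=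
  lines.foldl (fun acc s =>
    let r := aLoop s.toList 1 acc.2
    (acc.1 ++ [String.mk r.1], r.2)) ([], 0)

-- ===== PORT B =====
-- drop a character iff it is a ',' immediately followed by another ','
def collapse : List Char → List Char
  | [] => []
  | [c] => [c]
  | a :: b :: t => if a = ',' ∧ b = ',' then collapse (b :: t) else a :: collapse (b :: t)

def linewithoutcommas_alt (lines : List String) : List String × Int :=
  lines.foldl (fun acc s =>
    let t := collapse s.toList
    (acc.1 ++ [String.mk t], acc.2 + ((s.toList.count ',' : Int) - (t.count ',' : Int)))) ([], 0)

-- ===== PRECONDITION & SPEC =====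
def Spec_linewithoutcommas (lines : List String) (out : List String × Int) : Prop := out = linewithoutcommas_alt lines
instance (lines : List String) (out : List String × Int) : Decidable (Spec_linewithoutcommas lines out) := by unfold Spec_linewithoutcommas; infer_instance

-- ===== CLAIM (what is proved, stated in full; the proofs are below) =====
def Claim_equal_linewithoutcommas : Prop := ∀ (lines : List String), Dom_linewithoutcommas lines → Spec_linewithoutcommas lines (linewithoutcommas lines)

-- ===== LEMMAS AND PROOFS =====

-- proof-side characterisation of A's while loop: kept suffix and number of removals
def g (prev : Char) : List Char → List Char × Nat
  | [] => ([], 0)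
  | x :: t =>
    if x = ',' ∧ prev = ',' then
      let r := g prev t; (r.1, r.2 + 1)
    else
      let r := g x t; (x :: r.1, r.2)

theorem aLoop_eq (n : Nat) : ∀ (rest : List Char), rest.length ≤ n → ∀ (init : List Char) (prev : Char) (c : Int),
    aLoop (init ++ prev :: rest) (init.length + 1) c
      = (init ++ prev :: (g prev rest).1, c + ((g prev rest).2 : Int)) := by
  induction n with
  | zero =>
    intro rest h init prev c
    have : rest = [] := List.length_eq_zero_iff.mp (Nat.le_zero.mp h)
    subst this
    rw [aLoop]
    simp [g]
  | succ n ih =>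
    intro rest h init prev c
    cases rest with
    | nil => rw [aLoop]; simp [g]
    | cons x t =>
      have hk : init.length + 1 < (init ++ prev :: x :: t).length := by simp
      have hx : (init ++ prev :: x :: t)[init.length + 1]! = x := by simp
      have hp : (init ++ prev :: x :: t)[init.length + 1 - 1]! = prev := by simp
      rw [aLoop]
      simp only [hk, hx, hp, dif_pos]
      by_cases hcond : x = ',' ∧ x = prev
      · rw [if_pos hcond]
        have hsl : (init ++ prev :: x :: t).take (init.length + 1)
            ++ (init ++ prev :: x :: t).drop (init.length + 1 + 1) = init ++ prev :: t := by
          rw [show init ++ prev :: x :: t = (init ++ [prev]) ++ x :: t by simp,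
            show init.length + 1 = (init ++ [prev]).length by simp, List.take_left,
            List.drop_length_add_append 1]
          simp
        rw [hsl, ih t (by simp at h; omega) init prev (c + 1)]
        have hg : g prev (x :: t) = ((g prev t).1, (g prev t).2 + 1) := by
          rw [g, if_pos ⟨hcond.1, hcond.2 ▸ hcond.1⟩]
        rw [hg]
        simp only [Prod.mk.injEq]
        exact ⟨trivial, by push_cast; ring⟩
      · rw [if_neg hcond]
        have e2 : init ++ prev :: x :: t = (init ++ [prev]) ++ x :: t := by simp
        have := ih t (by simp at h; omega) (init ++ [prev]) x c
        rw [e2, show init.length + 1 + 1 = (init ++ [prev]).length + 1 by simp, this]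
        have hg : g prev (x :: t) = (x :: (g x t).1, (g x t).2) := by
          rw [g, if_neg (fun hq => hcond ⟨hq.1, hq.1.trans hq.2.symm⟩)]
        rw [hg]
        simp

theorem collapse_g (rest : List Char) : ∀ prev, collapse (prev :: rest) = prev :: (g prev rest).1 := by
  induction rest with
  | nil => intro prev; simp [collapse, g]
  | cons x t ih =>
    intro prev
    rw [collapse, g]
    by_cases hc : prev = ',' ∧ x = ','
    · rw [if_pos hc, if_pos ⟨hc.2, hc.1⟩, ih x]
      simp [hc.1, hc.2]
    · rw [if_neg hc, if_neg (by tauto), ih x]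

theorem g_count (rest : List Char) : ∀ prev, (g prev rest).2 + (g prev rest).1.count ',' = rest.count ',' := by
  induction rest with
  | nil => intro prev; simp [g]
  | cons x t ih =>
    intro prev
    rw [g]
    by_cases hc : x = ',' ∧ prev = ','
    · rw [if_pos hc]
      simp only [List.count_cons, hc.1]
      have := ih prev
      simp at this ⊢
      omega
    · rw [if_neg hc]
      simp only [List.count_cons]
      have := ih x
      simp at this ⊢
      omega

theorem line_eq (s : List Char) (c : Int) :
    aLoop s 1 c = (collapse s, c + ((s.count ',' : Int) - ((collapse s).count ',' : Int))) := by
  cases s with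
  | nil => rw [aLoop]; simp [collapse]
  | cons p rest =>
    have := aLoop_eq rest.length rest le_rfl [] p c
    simp only [List.nil_append, List.length_nil, Nat.zero_add] at this
    rw [this, collapse_g rest p]
    have hc := g_count rest p
    simp only [Prod.mk.injEq, List.count_cons]
    refine ⟨by trivial, ?_⟩
    rcases eq_or_ne p ',' with hp | hp
    · subst hp; simp; omega
    · simp [hp]; omega

-- ===== VERDICT (by name: the statement is the Claim_ definition above) =====
theorem linewithoutcommas_spec : Claim_equal_linewithoutcommas := by
  intro lines _
  unfold Spec_linewithoutcommas linewithoutcommas linewithoutcommas_alt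
  have hf : (fun (acc : List String × Int) (s : String) =>
        let r := aLoop s.toList 1 acc.2
        (acc.1 ++ [String.mk r.1], r.2))
      = (fun (acc : List String × Int) (s : String) =>
        let t := collapse s.toList
        (acc.1 ++ [String.mk t], acc.2 + ((s.toList.count ',' : Int) - (t.count ',' : Int)))) := by
    funext acc s
    simp only [line_eq]
  rw [hf]
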